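-- pv_equiv track=rewrite | github.com/mreagan3200/garchomp-bot | util/RolesUtil.py | get_levelup_rewards
-- ===== SOURCE A (Python) =====
-- from collections import defaultdict
--
-- def get_levelup_rewards(prevLevel, currLevel):
--     rewards = defaultdict(int)
--     for level in range(prevLevel, currLevel):
--         level += 1
--         rewards['money'] += level*100
--         if level % 5 == 0:
--             if level >= 0:
--                 rewards['xp_candy_xs'] += 2
--             if level >= 30:
--                 rewards['xp_candy_s'] += 2
--             if level >= 50:
--                 rewards['xp_candy_m'] += 2
--             if level >= 70:
--                 rewards['xp_candy_l'] += 2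
--             if level > 70:
--                 rewards['xp_candy_xl'] += 2
--         if level % 10 == 0:
--             candy = None
--             if level <= 10:
--                 candy = 'xp_candy_s'
--             elif level <= 30:
--                 candy = 'xp_candy_m'
--             elif level <= 50:
--                 candy = 'xp_candy_l'
--             else:
--                 candy = 'xp_candy_xl'
--             rewards[candy] += 5
--             rewards['rare_candy'] += 1
--     return rewards
-- ===== SOURCE B (Python) =====
-- from collections import defaultdict
--
-- # Candy tiers: key and the lowest reward level (a multiple of 5) at which the
-- # +2 bonus for that tier starts.
-- TIER_KEYS = ['xp_candy_xs', 'xp_candy_s', 'xp_candy_m', 'xp_candy_l', 'xp_candy_xl']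
-- TIER_MIN = [0, 30, 50, 70, 75]
-- BONUS_CUTOFFS = (10, 30, 50)
--
-- def get_levelup_rewards(prevLevel, currLevel):
--     # Money is an arithmetic series; candies only drop at multiples of 5, so
--     # step straight through those instead of visiting every level.
--     rewards = defaultdict(int)
--     if prevLevel < currLevel:
--         rewards['money'] = 50 * (currLevel * (currLevel + 1) - prevLevel * (prevLevel + 1))
--         start = -5 * (-(prevLevel + 1) // 5)
--         for level in range(start, currLevel + 1, 5):
--             for key, bound in zip(TIER_KEYS, TIER_MIN):
--                 if level >= bound:
--                     rewards[key] += 2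
--             if level % 10 == 0:
--                 size = sum(level > cutoff for cutoff in BONUS_CUTOFFS)
--                 rewards[TIER_KEYS[1 + size]] += 5
--                 rewards['rare_candy'] += 1
--     return rewards
-- ===== Notes on version B (the rewrite author's own statement) =====
-- stated objective: alternative
-- what changed: Money is computed as a closed-form arithmetic series and the loop steps only through the multiples of 5 in the range (the only levels that drop candy), with a table-driven tier loop and an arithmetic size index replacing the if/elif chains; same asymptotic cost, measured about the same speed.
import Mathlib
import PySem

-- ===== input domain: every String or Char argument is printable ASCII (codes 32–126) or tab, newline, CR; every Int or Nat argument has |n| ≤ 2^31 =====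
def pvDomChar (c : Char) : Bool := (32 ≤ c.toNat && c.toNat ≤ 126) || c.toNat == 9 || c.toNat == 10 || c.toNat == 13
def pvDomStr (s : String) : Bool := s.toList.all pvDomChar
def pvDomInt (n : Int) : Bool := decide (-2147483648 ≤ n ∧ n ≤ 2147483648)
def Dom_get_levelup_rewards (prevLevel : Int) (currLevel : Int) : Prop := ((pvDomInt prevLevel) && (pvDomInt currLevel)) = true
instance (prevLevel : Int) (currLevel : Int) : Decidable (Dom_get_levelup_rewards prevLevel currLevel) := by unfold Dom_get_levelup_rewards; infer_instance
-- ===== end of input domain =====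

-- B computes money as a closed-form arithmetic series and loops only over the
-- multiples of 5 in the range (the only levels that drop candy), with a
-- table-driven tier loop and an arithmetic size index replacing the if/elif chains.

-- ===== PORT A =====
def get_levelup_rewards (prevLevel : Int) (currLevel : Int) : List (String × Int) :=
  ((PySem.List.pyRange prevLevel currLevel 1).foldl (fun rewards level =>
    let level := level + 1
    let rewards := rewards.insert "money" (rewards.getD "money" 0 + level * 100)
    let rewards :=
      if PySem.Int.mod level 5 = 0 then
        let rewards := if 0 ≤ level then rewards.insert "xp_candy_xs" (rewards.getD "xp_candy_xs" 0 + 2) else rewards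
        let rewards := if 30 ≤ level then rewards.insert "xp_candy_s" (rewards.getD "xp_candy_s" 0 + 2) else rewards
        let rewards := if 50 ≤ level then rewards.insert "xp_candy_m" (rewards.getD "xp_candy_m" 0 + 2) else rewards
        let rewards := if 70 ≤ level then rewards.insert "xp_candy_l" (rewards.getD "xp_candy_l" 0 + 2) else rewards
        if 70 < level then rewards.insert "xp_candy_xl" (rewards.getD "xp_candy_xl" 0 + 2) else rewards
      else rewards
    if PySem.Int.mod level 10 = 0 then
      let candy : String :=
        if level ≤ 10 then "xp_candy_s"
        else if level ≤ 30 then "xp_candy_m"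
        else if level ≤ 50 then "xp_candy_l"
        else "xp_candy_xl"
      let rewards := rewards.insert candy (rewards.getD candy 0 + 5)
      rewards.insert "rare_candy" (rewards.getD "rare_candy" 0 + 1)
    else rewards
  ) PySem.Dict.empty).items

-- ===== PORT B =====
def pvTierKeys : List String := ["xp_candy_xs", "xp_candy_s", "xp_candy_m", "xp_candy_l", "xp_candy_xl"]
def pvTierMin : List Int := [0, 30, 50, 70, 75]
def pvBonusCutoffs : List Int := [10, 30, 50]

def get_levelup_rewards_alt (prevLevel : Int) (currLevel : Int) : List (String × Int) :=
  if prevLevel < currLevel then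
    let money := 50 * (currLevel * (currLevel + 1) - prevLevel * (prevLevel + 1))
    let start := -5 * PySem.Int.floordiv (-(prevLevel + 1)) 5
    ((PySem.List.pyRange start (currLevel + 1) 5).foldl (fun rewards level =>
      let rewards := (pvTierKeys.zip pvTierMin).foldl (fun rewards kb =>
          if kb.2 ≤ level then rewards.insert kb.1 (rewards.getD kb.1 0 + 2) else rewards) rewards
      if PySem.Int.mod level 10 = 0 then
        let size := (pvBonusCutoffs.map (fun cutoff => if cutoff < level then (1 : Int) else 0)).sum
        -- TIER_KEYS[1 + size]: size is 0..3, so the index is always in range; exact here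
        let key := (PySem.List.pyGet? pvTierKeys (1 + size)).getD ""
        let rewards := rewards.insert key (rewards.getD key 0 + 5)
        rewards.insert "rare_candy" (rewards.getD "rare_candy" 0 + 1)
      else rewards
    ) ((PySem.Dict.empty : PySem.Dict String Int).insert "money" money)).items
  else (PySem.Dict.empty : PySem.Dict String Int).items

-- ===== PRECONDITION & SPEC =====
def Spec_get_levelup_rewards (prevLevel : Int) (currLevel : Int) (out : List (String × Int)) : Prop := out = get_levelup_rewards_alt prevLevel currLevel
instance (prevLevel : Int) (currLevel : Int) (out : List (String × Int)) : Decidable (Spec_get_levelup_rewards prevLevel currLevel out) := by unfold Spec_get_levelup_rewards; infer_instance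

-- ===== CLAIM (what is proved, stated in full; the proofs are below) =====
def Claim_equal_get_levelup_rewards : Prop := ∀ (prevLevel : Int) (currLevel : Int), Dom_get_levelup_rewards prevLevel currLevel → Spec_get_levelup_rewards prevLevel currLevel (get_levelup_rewards prevLevel currLevel)

-- ===== LEMMAS AND PROOFS =====

-- 'rewards[k] += a'
def pvBump (k : String) (a : Int) (d : PySem.Dict String Int) : PySem.Dict String Int :=
  d.insert k (d.getD k 0 + a)

def pvMoneyAdd (L : Int) (d : PySem.Dict String Int) : PySem.Dict String Int :=
  pvBump "money" (L * 100) d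

def pvCandyKey (L : Int) : String :=
  if L ≤ 10 then "xp_candy_s"
  else if L ≤ 30 then "xp_candy_m"
  else if L ≤ 50 then "xp_candy_l"
  else "xp_candy_xl"

-- the candy part of A's loop body
def pvCStep (d : PySem.Dict String Int) (L : Int) : PySem.Dict String Int :=
  let d :=
    if PySem.Int.mod L 5 = 0 then
      let d := if 0 ≤ L then pvBump "xp_candy_xs" 2 d else d
      let d := if 30 ≤ L then pvBump "xp_candy_s" 2 d else d
      let d := if 50 ≤ L then pvBump "xp_candy_m" 2 d else d
      let d := if 70 ≤ L then pvBump "xp_candy_l" 2 d else d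
      if 70 < L then pvBump "xp_candy_xl" 2 d else d
    else d
  if PySem.Int.mod L 10 = 0 then
    pvBump "rare_candy" 1 (pvBump (pvCandyKey L) 5 d)
  else d

def pvAStep (d : PySem.Dict String Int) (L : Int) : PySem.Dict String Int :=
  pvCStep (pvMoneyAdd L d) L

-- B's loop body
def pvBStep (d : PySem.Dict String Int) (L : Int) : PySem.Dict String Int :=
  let d := (pvTierKeys.zip pvTierMin).foldl (fun d kb =>
      if kb.2 ≤ L then d.insert kb.1 (d.getD kb.1 0 + 2) else d) d
  if PySem.Int.mod L 10 = 0 then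
    let size := (pvBonusCutoffs.map (fun cutoff => if cutoff < L then (1 : Int) else 0)).sum
    let key := (PySem.List.pyGet? pvTierKeys (1 + size)).getD ""
    let d := d.insert key (d.getD key 0 + 5)
    d.insert "rare_candy" (d.getD "rare_candy" 0 + 1)
  else d

def pvStart (p : Int) : Int := -5 * PySem.Int.floordiv (-(p + 1)) 5

theorem pvA_eq (p c : Int) : get_levelup_rewards p c
    = ((PySem.List.pyRange p c 1).foldl (fun d lv => pvAStep d (lv + 1)) PySem.Dict.empty).items := rfl

theorem pvB_eq (p c : Int) (h : p < c) : get_levelup_rewards_alt p c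
    = ((PySem.List.pyRange (pvStart p) (c + 1) 5).foldl pvBStep
        ((PySem.Dict.empty : PySem.Dict String Int).insert "money"
          (50 * (c * (c + 1) - p * (p + 1))))).items := by
  unfold get_levelup_rewards_alt
  rw [if_pos h]
  rfl

theorem pvMod5 (x : Int) : PySem.Int.mod x 5 = x % 5 := PySem.Int.mod_eq_emod_of_pos (by norm_num)
theorem pvMod10 (x : Int) : PySem.Int.mod x 10 = x % 10 := PySem.Int.mod_eq_emod_of_pos (by norm_num)

theorem pvStart_facts (p : Int) : p + 1 ≤ pvStart p ∧ pvStart p ≤ p + 5 ∧ pvStart p % 5 = 0 := by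
  unfold pvStart
  rw [PySem.Int.floordiv_eq_ediv_of_pos (by norm_num)]
  omega

theorem pvRangeNil (s b : Int) (h : b ≤ s) : PySem.List.pyRange s b 5 = [] := by
  rw [PySem.List.pyRange_of_pos _ _ (by norm_num : (0:Int) < 5), if_neg (by omega)]
  rfl

theorem pvR5 (s q : Int) (hs : s % 5 = 0) :
    PySem.List.pyRange s (q + 2) 5 =
      PySem.List.pyRange s (q + 1) 5 ++ (if (q + 1) % 5 = 0 ∧ s ≤ q + 1 then [q + 1] else []) := by
  rw [PySem.List.pyRange_of_pos _ _ (by norm_num : (0:Int) < 5),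
      PySem.List.pyRange_of_pos _ _ (by norm_num : (0:Int) < 5)]
  by_cases h : (q + 1) % 5 = 0 ∧ s ≤ q + 1
  · have h1 : (if s < q + 2 then ((q + 2 - s + 5 - 1) / 5).toNat else 0)
        = (if s < q + 1 then ((q + 1 - s + 5 - 1) / 5).toNat else 0) + 1 := by
      split_ifs <;> omega
    rw [h1, List.range_succ, List.map_append, if_pos h]
    congr 1
    simp only [List.map_cons, List.map_nil, List.cons.injEq, and_true]
    split_ifs <;> omega
  · have h1 : (if s < q + 2 then ((q + 2 - s + 5 - 1) / 5).toNat else 0)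
        = (if s < q + 1 then ((q + 1 - s + 5 - 1) / 5).toNat else 0) := by
      split_ifs <;> omega
    rw [h1, if_neg h, List.append_nil]

-- commuting an update of "money" past a bump of another key
theorem pvIns_comm (d : PySem.Dict String Int) (k : String) (v w : Int)
    (hk : ¬ k = "money") (hm : d.contains "money" = true) :
    (d.insert "money" w).insert k v = (d.insert k v).insert "money" w := by
  apply PySem.Dict.ext
  have hck : (d.insert "money" w).contains k = d.contains k := by
    rw [PySem.Dict.contains_insert]
    simp [hk]
  have hcm : (d.insert k v).contains "money" = true := by
    rw [PySem.Dict.contains_insert]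
    simp [hm]
  by_cases h : d.contains k = true
  · rw [PySem.Dict.items_insert, hck, if_pos h, PySem.Dict.items_insert, if_pos hm,
      PySem.Dict.items_insert, if_pos hcm, PySem.Dict.items_insert, if_pos h,
      List.map_map, List.map_map]
    apply List.map_congr_left
    intro x _
    have hk' : ¬ "money" = k := fun h => hk h.symm
    by_cases h1 : x.1 = k
    · simp [Function.comp, h1, hk]
    · by_cases h2 : x.1 = "money" <;> simp [Function.comp, h1, h2, hk']
  · have h' : d.contains k = false := by simpa using h
    rw [PySem.Dict.items_insert, hck, if_neg (by simp [h']), PySem.Dict.items_insert, if_pos hm,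
      PySem.Dict.items_insert, if_pos hcm, PySem.Dict.items_insert, if_neg (by simp [h']),
      List.map_append]
    simp [hk]

theorem pvBump_comm (k : String) (a w : Int) (d : PySem.Dict String Int)
    (hk : ¬ k = "money") (hm : d.contains "money" = true) :
    pvBump k a (d.insert "money" w) = (pvBump k a d).insert "money" w := by
  unfold pvBump
  rw [PySem.Dict.getD_insert, if_neg hk, pvIns_comm d k _ w hk hm]

theorem pvBump_getD_money (k : String) (a : Int) (d : PySem.Dict String Int)
    (hk : ¬ "money" = k) : (pvBump k a d).getD "money" 0 = d.getD "money" 0 := by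
  unfold pvBump
  rw [PySem.Dict.getD_insert, if_neg hk]

def pvOps (L : Int) : List (String × Int) :=
  (if L % 5 = 0 then
     (if 0 ≤ L then [("xp_candy_xs", (2:Int))] else [])
     ++ (if 30 ≤ L then [("xp_candy_s", (2:Int))] else [])
     ++ (if 50 ≤ L then [("xp_candy_m", (2:Int))] else [])
     ++ (if 70 ≤ L then [("xp_candy_l", (2:Int))] else [])
     ++ (if 70 < L then [("xp_candy_xl", (2:Int))] else [])
   else [])
  ++ (if L % 10 = 0 then [(pvCandyKey L, (5:Int)), ("rare_candy", (1:Int))] else [])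

theorem pvC_eq_ops (d : PySem.Dict String Int) (L : Int) :
    pvCStep d L = (pvOps L).foldl (fun d ka => pvBump ka.1 ka.2 d) d := by
  unfold pvCStep pvOps pvCandyKey
  rw [pvMod5, pvMod10]
  split_ifs <;> simp [List.foldl]

theorem pvOps_keys (L : Int) : ∀ ka ∈ pvOps L, ¬ ka.1 = "money" := by
  intro ka h
  unfold pvOps pvCandyKey at h
  split_ifs at h <;> simp at h <;>
    rcases h with rfl | rfl | rfl | rfl | rfl | rfl | rfl <;> simp

theorem pvBump_contains' (k : String) (a : Int) (d : PySem.Dict String Int) :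
    (pvBump k a d).contains "money" = ("money" == k || d.contains "money") := by
  unfold pvBump
  rw [PySem.Dict.contains_insert]

theorem pvOpsFold_contains (ops : List (String × Int)) (d : PySem.Dict String Int)
    (hm : d.contains "money" = true) :
    (ops.foldl (fun d ka => pvBump ka.1 ka.2 d) d).contains "money" = true := by
  induction ops generalizing d with
  | nil => exact hm
  | cons ka tl ih =>
    simp only [List.foldl_cons]
    exact ih _ (by rw [pvBump_contains', hm, Bool.or_true])

theorem pvOpsFold_comm (ops : List (String × Int)) (hops : ∀ ka ∈ ops, ¬ ka.1 = "money")
    (d : PySem.Dict String Int) (w : Int) (hm : d.contains "money" = true) :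
    ops.foldl (fun d ka => pvBump ka.1 ka.2 d) (d.insert "money" w)
      = (ops.foldl (fun d ka => pvBump ka.1 ka.2 d) d).insert "money" w := by
  induction ops generalizing d with
  | nil => rfl
  | cons ka tl ih =>
    simp only [List.foldl_cons]
    rw [pvBump_comm ka.1 ka.2 w d (hops ka (List.mem_cons_self ..)) hm]
    exact ih (fun x hx => hops x (List.mem_cons_of_mem _ hx)) _
      (by rw [pvBump_contains', hm, Bool.or_true])

theorem pvOpsFold_getD (ops : List (String × Int)) (hops : ∀ ka ∈ ops, ¬ ka.1 = "money")
    (d : PySem.Dict String Int) :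
    (ops.foldl (fun d ka => pvBump ka.1 ka.2 d) d).getD "money" 0 = d.getD "money" 0 := by
  induction ops generalizing d with
  | nil => rfl
  | cons ka tl ih =>
    simp only [List.foldl_cons]
    rw [ih (fun x hx => hops x (List.mem_cons_of_mem _ hx)),
      pvBump_getD_money _ _ _ (fun h => hops ka (List.mem_cons_self ..) h.symm)]

theorem pvC_comm (d : PySem.Dict String Int) (L w : Int) (hm : d.contains "money" = true) :
    pvCStep (d.insert "money" w) L = (pvCStep d L).insert "money" w := by
  rw [pvC_eq_ops, pvC_eq_ops]
  exact pvOpsFold_comm _ (pvOps_keys L) d w hm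

theorem pvC_contains (d : PySem.Dict String Int) (L : Int) (hm : d.contains "money" = true) :
    (pvCStep d L).contains "money" = true := by
  rw [pvC_eq_ops]
  exact pvOpsFold_contains _ d hm

theorem pvC_getD_money (d : PySem.Dict String Int) (L : Int) :
    (pvCStep d L).getD "money" 0 = d.getD "money" 0 := by
  rw [pvC_eq_ops]
  exact pvOpsFold_getD _ (pvOps_keys L) d

theorem pvFold_comm (ms : List Int) (d : PySem.Dict String Int) (w : Int)
    (hm : d.contains "money" = true) :
    ms.foldl pvCStep (d.insert "money" w) = (ms.foldl pvCStep d).insert "money" w := by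
  induction ms generalizing d with
  | nil => rfl
  | cons L tl ih =>
    simp only [List.foldl_cons]
    rw [pvC_comm d L w hm, ih _ (pvC_contains d L hm)]

theorem pvFold_getD_money (ms : List Int) (d : PySem.Dict String Int) :
    (ms.foldl pvCStep d).getD "money" 0 = d.getD "money" 0 := by
  induction ms generalizing d with
  | nil => rfl
  | cons L tl ih =>
    simp only [List.foldl_cons]
    rw [ih, pvC_getD_money]

theorem pvCN (d : PySem.Dict String Int) (L : Int) (h5 : ¬ L % 5 = 0) : pvCStep d L = d := by
  unfold pvCStep
  rw [pvMod5, pvMod10, if_neg h5, if_neg (by omega)]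

theorem pvKeyB (L : Int) :
    (PySem.List.pyGet? pvTierKeys
        (1 + (pvBonusCutoffs.map (fun cutoff => if cutoff < L then (1 : Int) else 0)).sum)).getD ""
      = pvCandyKey L := by
  have e10 : ((10 : Int) < L) = ¬ (L ≤ 10) := by simp [not_le]
  have e30 : ((30 : Int) < L) = ¬ (L ≤ 30) := by simp [not_le]
  have e50 : ((50 : Int) < L) = ¬ (L ≤ 50) := by simp [not_le]
  unfold pvBonusCutoffs pvCandyKey
  by_cases h10 : L ≤ 10 <;> by_cases h30 : L ≤ 30 <;> by_cases h50 : L ≤ 50 <;>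
    first
    | omega
    | simp [e10, e30, e50, h10, h30, h50, pvTierKeys, PySem.List.pyGet?, PySem.List.pyIdx?]

-- at a multiple of 5, A's candy block and B's loop body coincide
theorem pvCB (d : PySem.Dict String Int) (L : Int) (h5 : L % 5 = 0) :
    pvCStep d L = pvBStep d L := by
  unfold pvCStep pvBStep
  rw [pvMod5, pvMod10, if_pos h5]
  have hxl : (70 < L) = (75 ≤ L) := by
    apply propext; constructor <;> intro <;> omega
  simp only [pvKeyB]
  simp only [pvBump, hxl, pvTierKeys, pvTierMin, List.zip_cons_cons, List.zip_nil_right,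
    List.foldl_cons, List.foldl_nil]

theorem pvInv1 (p : Int) :
    (PySem.List.pyRange (p + 1) (p + 1 + 1) 1).foldl pvAStep PySem.Dict.empty
      = (PySem.List.pyRange (pvStart p) (p + 1 + 1) 5).foldl pvCStep
          ((PySem.Dict.empty : PySem.Dict String Int).insert "money"
            (50 * ((p + 1) * (p + 1 + 1) - p * (p + 1)))) := by
  have hsf := pvStart_facts p
  rw [show (p + 1 + 1 : Int) = p + 2 from by ring]
  have hr : PySem.List.pyRange (p + 1) (p + 2) 1 = [p + 1] := by
    rw [show (p + 2 : Int) = (p + 1) + 1 from by ring]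
    exact PySem.List.pyRange_one_singleton _
  rw [hr, pvR5 (pvStart p) p hsf.2.2, pvRangeNil (pvStart p) (p + 1) (by omega)]
  have hd : pvBump "money" ((p + 1) * 100) (PySem.Dict.empty : PySem.Dict String Int)
      = (PySem.Dict.empty : PySem.Dict String Int).insert "money"
          (50 * ((p + 1) * (p + 2) - p * (p + 1))) := by
    unfold pvBump
    rw [PySem.Dict.getD_empty]
    congr 1
    ring
  by_cases h5 : (p + 1) % 5 = 0
  · rw [if_pos ⟨h5, by omega⟩]
    simp only [List.nil_append, List.foldl_cons, List.foldl_nil]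
    show pvCStep (pvBump "money" ((p + 1) * 100) PySem.Dict.empty) (p + 1) = _
    rw [hd]
  · rw [if_neg (fun h => h5 h.1)]
    simp only [List.nil_append, List.foldl_cons, List.foldl_nil]
    show pvCStep (pvBump "money" ((p + 1) * 100) PySem.Dict.empty) (p + 1) = _
    rw [hd, pvCN _ _ h5]

theorem pvInvStep (p q m : Int) (hq : p ≤ q)
    (ih : (PySem.List.pyRange (p + 1) (q + 1) 1).foldl pvAStep PySem.Dict.empty
      = (PySem.List.pyRange (pvStart p) (q + 1) 5).foldl pvCStep
          ((PySem.Dict.empty : PySem.Dict String Int).insert "money" m)) :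
    (PySem.List.pyRange (p + 1) (q + 2) 1).foldl pvAStep PySem.Dict.empty
      = (PySem.List.pyRange (pvStart p) (q + 2) 5).foldl pvCStep
          ((PySem.Dict.empty : PySem.Dict String Int).insert "money" (m + (q + 1) * 100)) := by
  have hsf := pvStart_facts p
  rw [show (q + 2 : Int) = (q + 1) + 1 from by ring,
    PySem.List.pyRange_one_succ_right (by omega : p + 1 ≤ q + 1), List.foldl_append]
  simp only [List.foldl_cons, List.foldl_nil]
  rw [ih]
  show pvCStep (pvMoneyAdd (q + 1) _) (q + 1) = _
  unfold pvMoneyAdd pvBump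
  rw [pvFold_getD_money, PySem.Dict.getD_insert_self,
    ← pvFold_comm _ _ _ (PySem.Dict.contains_insert_self _ _ _),
    PySem.Dict.insert_insert_self]
  rw [show (q + 1) + 1 = q + 2 from by ring, pvR5 (pvStart p) q hsf.2.2]
  by_cases h5 : (q + 1) % 5 = 0
  · rw [if_pos ⟨h5, by omega⟩, List.foldl_append]
    simp only [List.foldl_cons, List.foldl_nil]
  · rw [if_neg (fun h => h5 h.1), List.append_nil, pvCN _ _ h5]

theorem pvInvAll (p : Int) : ∀ n : Nat,
    (PySem.List.pyRange (p + 1) (p + 1 + n + 1) 1).foldl pvAStep PySem.Dict.empty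
      = (PySem.List.pyRange (pvStart p) (p + 1 + n + 1) 5).foldl pvCStep
          ((PySem.Dict.empty : PySem.Dict String Int).insert "money"
            (50 * ((p + 1 + n) * (p + 1 + n + 1) - p * (p + 1)))) := by
  intro n
  induction n with
  | zero =>
    simp only [Nat.cast_zero, add_zero]
    exact pvInv1 p
  | succ n ih =>
    push_cast
    rw [show (50 * ((p + 1 + ((n : Int) + 1)) * (p + 1 + ((n : Int) + 1) + 1) - p * (p + 1)) : Int)
        = 50 * ((p + 1 + (n : Int)) * (p + 1 + (n : Int) + 1) - p * (p + 1))
          + ((p + 1 + (n : Int)) + 1) * 100 from by ring,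
      show (p + 1 + ((n : Int) + 1) + 1 : Int) = (p + 1 + (n : Int)) + 2 from by ring]
    exact pvInvStep p (p + 1 + (n : Int)) _ (by omega) ih

theorem pvShift (p c : Int) :
    (PySem.List.pyRange p c 1).foldl (fun d lv => pvAStep d (lv + 1)) PySem.Dict.empty
      = (PySem.List.pyRange (p + 1) (c + 1) 1).foldl pvAStep PySem.Dict.empty := by
  rw [PySem.List.pyRange_one, PySem.List.pyRange_one, List.foldl_map, List.foldl_map,
    show (c + 1 - (p + 1) : Int) = c - p from by ring]
  have h : (fun (d : PySem.Dict String Int) (k : Nat) => pvAStep d (p + k + 1))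
      = fun (d : PySem.Dict String Int) (k : Nat) => pvAStep d (p + 1 + k) := by
    funext d k
    congr 1
    ring
  exact congrArg (fun f => (List.range (c - p).toNat).foldl f PySem.Dict.empty) h

theorem pvBfold (p b : Int) (init : PySem.Dict String Int) :
    (PySem.List.pyRange (pvStart p) b 5).foldl pvBStep init
      = (PySem.List.pyRange (pvStart p) b 5).foldl pvCStep init := by
  apply PySem.List.foldl_congr_mem
  intro acc x hx
  have hm := (PySem.List.mem_pyRange_iff_of_pos (by norm_num : (0:Int) < 5) x).mp hx
  have hs := (pvStart_facts p).2.2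
  exact (pvCB acc x (by omega)).symm

theorem pv_main (p c : Int) : get_levelup_rewards p c = get_levelup_rewards_alt p c := by
  by_cases hc : c ≤ p
  · rw [pvA_eq, PySem.List.pyRange_one_eq_nil hc]
    unfold get_levelup_rewards_alt
    rw [if_neg (by omega)]
    rfl
  · rw [pvA_eq, pvShift, pvB_eq p c (by omega), pvBfold]
    have hc1 : c = p + 1 + ((c - p - 1).toNat : Int) := by omega
    rw [hc1]
    exact congrArg PySem.Dict.items (pvInvAll p (c - p - 1).toNat)

-- ===== VERDICT (by name: the statement is the Claim_ definition above) =====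
theorem get_levelup_rewards_spec : Claim_equal_get_levelup_rewards := by
  intro p c _
  unfold Spec_get_levelup_rewards
  exact pv_main p c
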